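-- pv_equiv track=rewrite | github.com/deeppavlov/DeepPavlov | deeppavlov/models/morpho_tagger/common_tagger.py | get_tag_distance
-- ===== SOURCE A (Python) =====
-- from typing import Union, Optional, Tuple
--
-- def make_pos_and_tag(tag: str, sep: str = ",",
--                      return_mode: Optional[str] = None) -> Tuple[str, Union[str, list, dict, tuple]]:
--     """
--     Args:
--         tag: the part-of-speech tag
--         sep: the separator between part-of-speech tag and grammatical features
--         return_mode: the type of return value, can be None, list, dict or sorted_items
--
--     Returns:
--         the part-of-speech label and grammatical features in required format
--     """
--     if tag.endswith(" _"):
--         tag = tag[:-2]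
--     if sep in tag:
--         pos, tag = tag.split(sep, maxsplit=1)
--     else:
--         pos, tag = tag, ("_" if return_mode is None else "")
--     if return_mode in ["dict", "list", "sorted_items"]:
--         tag = tag.split("|") if tag != "" else []
--         if return_mode in ["dict", "sorted_items"]:
--             tag = dict(tuple(elem.split("=")) for elem in tag)
--             if return_mode == "sorted_items":
--                 tag = tuple(sorted(tag.items()))
--     return pos, tag
--
-- def _are_equal_pos(first, second):
--     NOUNS, VERBS, CONJ = ["NOUN", "PROPN"], ["AUX", "VERB"], ["CCONJ", "SCONJ"]
--     return (first == second or any((first in parts) and (second in parts)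
--                                    for parts in [NOUNS, VERBS, CONJ]))
--
-- IDLE_FEATURES = {"Voice", "Animacy", "Degree", "Mood", "VerbForm"}
--
-- def get_tag_distance(first, second, first_sep=",", second_sep=" "):
--     """
--     Measures the distance between two (Russian) morphological tags in UD Format.
--     The first tag is usually the one predicted by our model (therefore it uses comma
--     as separator), while the second is usually the result of automatical conversion,
--     where the separator is space.
--
--     Args:
--         first: UD morphological tag
--         second: UD morphological tag (usually the output of 'russian_tagsets' converter)
--         first_sep: separator between two parts of the first tag
--         second_sep: separator between two parts of the second tag
--
--     Returns:
--         the number of mismatched feature values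
--     """
--     first_pos, first_feats = make_pos_and_tag(first, sep=first_sep, return_mode="dict")
--     second_pos, second_feats = make_pos_and_tag(second, sep=second_sep, return_mode="dict")
--     dist = int(not _are_equal_pos(first_pos, second_pos))
--     for key, value in first_feats.items():
--         other = second_feats.get(key)
--         if other is None:
--             dist += int(key not in IDLE_FEATURES)
--         else:
--             dist += int(value != other)
--     for key in second_feats:
--         dist += int(key not in first_feats and key not in IDLE_FEATURES)
--     return dist
-- ===== SOURCE B (Python) =====
-- IDLE_FEATURES = {"Voice", "Animacy", "Degree", "Mood", "VerbForm"}
--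
--
-- def _are_equal_pos(first, second):
--     NOUNS, VERBS, CONJ = ["NOUN", "PROPN"], ["AUX", "VERB"], ["CCONJ", "SCONJ"]
--     return (first == second or any((first in parts) and (second in parts)
--                                    for parts in [NOUNS, VERBS, CONJ]))
--
--
-- def _parse(tag, sep):
--     """pos label and feature dict of a UD tag (make_pos_and_tag specialised to dict mode)."""
--     if tag.endswith(" _"):
--         tag = tag[:-2]
--     if sep in tag:
--         pos, feats = tag.split(sep, maxsplit=1)
--     else:
--         pos, feats = tag, ""
--     items = feats.split("|") if feats else []
--     return pos, dict(tuple(c.split("=")) for c in items)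
--
--
-- def get_tag_distance(first, second, first_sep=",", second_sep=" "):
--     """Sort both key sets and count mismatches in one two-pointer merge of the
--     sorted key lists (shared key -> value comparison, one-sided key -> counted
--     unless idle), instead of dict-lookup passes over each feature dict."""
--     first_pos, first_feats = _parse(first, first_sep)
--     second_pos, second_feats = _parse(second, second_sep)
--     ks1, ks2 = sorted(first_feats), sorted(second_feats)
--     dist = int(not _are_equal_pos(first_pos, second_pos))
--     i = j = 0
--     while i < len(ks1) and j < len(ks2):
--         k1, k2 = ks1[i], ks2[j]
--         if k1 == k2:
--             dist += first_feats[k1] != second_feats[k2]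
--             i += 1
--             j += 1
--         elif k1 < k2:
--             dist += k1 not in IDLE_FEATURES
--             i += 1
--         else:
--             dist += k2 not in IDLE_FEATURES
--             j += 1
--     dist += sum(k not in IDLE_FEATURES for k in ks1[i:])
--     dist += sum(k not in IDLE_FEATURES for k in ks2[j:])
--     return dist
-- ===== Notes on version B (the rewrite author's own statement) =====
-- stated objective: alternative
-- what changed: A's two dict-lookup passes (per-key .get()/membership branching over each feature dict) are replaced by sorting both key sets and counting all mismatches in a single two-pointer merge of the two sorted key lists; correct because feature keys are unique, so the merge visits exactly the shared keys once (value comparison) and each one-sided key once (idle filter).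
import Mathlib
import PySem

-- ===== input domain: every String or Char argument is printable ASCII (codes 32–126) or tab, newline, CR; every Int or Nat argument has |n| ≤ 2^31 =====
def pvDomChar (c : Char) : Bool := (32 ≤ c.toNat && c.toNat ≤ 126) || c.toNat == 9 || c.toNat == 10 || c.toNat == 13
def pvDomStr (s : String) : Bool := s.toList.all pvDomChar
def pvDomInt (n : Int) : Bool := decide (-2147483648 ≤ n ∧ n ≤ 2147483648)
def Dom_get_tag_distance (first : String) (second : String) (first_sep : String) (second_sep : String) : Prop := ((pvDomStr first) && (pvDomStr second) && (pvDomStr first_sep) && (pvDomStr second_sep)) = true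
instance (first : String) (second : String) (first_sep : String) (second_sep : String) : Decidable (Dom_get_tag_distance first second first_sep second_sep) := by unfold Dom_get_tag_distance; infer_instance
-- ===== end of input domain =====

-- B replaces A's two dict-lookup passes by sorting both key sets and counting all
-- mismatches in one two-pointer merge of the sorted key lists; objective: alternative.

-- ===== PORT A =====
-- Shared module context: IDLE_FEATURES, _are_equal_pos and the dict-mode tag parser
-- (A calls make_pos_and_tag(…, return_mode="dict"); Source B's _parse is that same
-- specialisation, so both ports use the one transliteration pvMakePosAndTag).
def pvIdle : List (List Char) :=
  ["Voice".toList, "Animacy".toList, "Degree".toList, "Mood".toList, "VerbForm".toList]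

def pvAreEqualPos (f s : List Char) : Bool :=
  f == s ||
    [["NOUN".toList, "PROPN".toList], ["AUX".toList, "VERB".toList],
     ["CCONJ".toList, "SCONJ".toList]].any
      (fun parts => decide (f ∈ parts) && decide (s ∈ parts))

-- dict(tuple(elem.split("=")) for elem in tag): builds the dict in order, overwrite
-- in place; none exactly where Python raises ValueError (a chunk without exactly one '=')
def pvBuildFeats : List (List Char) → PySem.Dict (List Char) (List Char) →
    Option (PySem.Dict (List Char) (List Char))
  | [], d => some d
  | c :: rest, d =>
      match PySem.Chars.split? c ['='] with
      | some [k, v] => pvBuildFeats rest (d.insert k v)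
      | _ => none

-- make_pos_and_tag(tag, sep, return_mode="dict"); none = Python raises
-- (empty separator in split, or a feature chunk without exactly one '=')
def pvMakePosAndTag (tag sep : String) :
    Option (List Char × PySem.Dict (List Char) (List Char)) :=
  let t0 := tag.toList
  let t := if PySem.Chars.endswith t0 (' ' :: ['_'])
           then PySem.List.slice t0 none (some (-2)) else t0
  if PySem.Chars.isIn sep.toList t then
    match PySem.Chars.splitMax? t sep.toList 1 with
    | some (pos :: feats :: _) =>
        -- feats.split("|"): '|' is nonempty so split? is always some; getD [] is never used
        let chunks := if feats = [] then [] else (PySem.Chars.split? feats ['|']).getD []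
        (pvBuildFeats chunks PySem.Dict.empty).map (fun d => (pos, d))
    | _ => none   -- sep = "": Python's split raises ValueError (empty separator)
  else
    some (t, PySem.Dict.empty)

def get_tag_distance (first : String) (second : String) (first_sep : String) (second_sep : String) : Int :=
  match pvMakePosAndTag first first_sep, pvMakePosAndTag second second_sep with
  | some (fpos, ffeats), some (spos, sfeats) =>
      let dist : Int := if pvAreEqualPos fpos spos then 0 else 1
      let dist := ffeats.items.foldl (fun acc kv =>
          acc + (match sfeats.get? kv.1 with
                 | none => if kv.1 ∈ pvIdle then 0 else 1
                 | some other => if kv.2 ≠ other then 1 else 0)) dist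
      sfeats.keys.foldl (fun acc k =>
          acc + (if ¬ ffeats.contains k ∧ k ∉ pvIdle then 1 else 0)) dist
  | _, _ => 0   -- Python raises ValueError here; excluded by Pre_

-- ===== PORT B =====
-- sorted(first_feats): Python sorts the key strings; the LinearOrder on List Char is
-- the same lexicographic code-point order
def pvSortKeys (ks : List (List Char)) : List (List Char) :=
  @PySem.List.sorted _ _ List.instLinearOrder.toLT LinearOrder.toDecidableLT ks (fun k => k) false

-- the while-loop two-pointer merge; the base cases are the two trailing sums
-- 'sum(k not in IDLE_FEATURES for k in ks[i:])'
def pvMergeCount (ff sf : PySem.Dict (List Char) (List Char)) :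
    List (List Char) → List (List Char) → Int
  | k1 :: t1, k2 :: t2 =>
      if k1 = k2 then
        (if ff.getD k1 [] ≠ sf.getD k2 [] then 1 else 0) + pvMergeCount ff sf t1 t2
      else if k1 < k2 then
        (if k1 ∈ pvIdle then 0 else 1) + pvMergeCount ff sf t1 (k2 :: t2)
      else
        (if k2 ∈ pvIdle then 0 else 1) + pvMergeCount ff sf (k1 :: t1) t2
  | [], ks2 => ((ks2.countP (fun k => decide (k ∉ pvIdle)) : Nat) : Int)
  | ks1, _ => ((ks1.countP (fun k => decide (k ∉ pvIdle)) : Nat) : Int)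
  termination_by l1 l2 => l1.length + l2.length
  decreasing_by all_goals (simp only [List.length_cons]; omega)

def get_tag_distance_alt (first : String) (second : String) (first_sep : String) (second_sep : String) : Int :=
  match pvMakePosAndTag first first_sep, pvMakePosAndTag second second_sep with
  | some (fpos, ffeats), some (spos, sfeats) =>
      let ks1 := pvSortKeys ffeats.keys
      let ks2 := pvSortKeys sfeats.keys
      (if pvAreEqualPos fpos spos then (0 : Int) else 1) + pvMergeCount ffeats sfeats ks1 ks2
  | _, _ => 0   -- Python raises ValueError here; excluded by Pre_

-- ===== PRECONDITION & SPEC =====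
-- the '|'-separated chunks of the feature field (the part of the tag after the first
-- occurrence of the separator, the trailing " _" removed); shape description for Pre_
def pvFeatChunks (tag sep : List Char) : List (List Char) :=
  let t := if PySem.Chars.endswith tag (' ' :: ['_'])
           then PySem.List.slice tag none (some (-2)) else tag
  if PySem.Chars.isIn sep t then
    match PySem.Chars.splitMax? t sep 1 with
    | some (_ :: feats :: _) =>
        if feats = [] then [] else (PySem.Chars.split? feats ['|']).getD []
    | _ => []
  else []

-- Pre_ excludes exactly the inputs where Python A raises ValueError: an empty separator,
-- or a feature chunk that does not contain exactly one '=' (dict() rejects it).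
def Pre_get_tag_distance (first : String) (second : String) (first_sep : String) (second_sep : String) : Prop :=
  first_sep ≠ "" ∧ second_sep ≠ "" ∧
  (∀ c ∈ pvFeatChunks first.toList first_sep.toList, PySem.Chars.count c ['='] = 1) ∧
  (∀ c ∈ pvFeatChunks second.toList second_sep.toList, PySem.Chars.count c ['='] = 1)

instance (first : String) (second : String) (first_sep : String) (second_sep : String) : Decidable (Pre_get_tag_distance first second first_sep second_sep) := by
  unfold Pre_get_tag_distance; infer_instance

def pvWitness_get_tag_distance : String × String × String × String :=
  ("NOUN,Case=Nom|Number=Sing", "NOUN Case=Gen", ",", " ")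

def Spec_get_tag_distance (first : String) (second : String) (first_sep : String) (second_sep : String) (out : Int) : Prop := out = get_tag_distance_alt first second first_sep second_sep
instance (first : String) (second : String) (first_sep : String) (second_sep : String) (out : Int) : Decidable (Spec_get_tag_distance first second first_sep second_sep out) := by unfold Spec_get_tag_distance; infer_instance

-- ===== CLAIM (what is proved, stated in full; the proofs are below) =====
def Claim_equal_get_tag_distance : Prop := ∀ (first : String) (second : String) (first_sep : String) (second_sep : String), Dom_get_tag_distance first second first_sep second_sep → Pre_get_tag_distance first second first_sep second_sep → Spec_get_tag_distance first second first_sep second_sep (get_tag_distance first second first_sep second_sep)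

-- ===== LEMMAS AND PROOFS =====

-- the per-key contribution of A's first loop (match on second_feats), as a key function
def pvF (ff sf : PySem.Dict (List Char) (List Char)) (k : List Char) : Int :=
  if k ∈ sf.keys then (if ff.getD k [] ≠ sf.getD k [] then 1 else 0)
  else (if k ∈ pvIdle then 0 else 1)

-- the per-key contribution of A's second loop
def pvG (ff : PySem.Dict (List Char) (List Char)) (k : List Char) : Int :=
  if k ∉ ff.keys ∧ k ∉ pvIdle then 1 else 0

theorem pvBuildFeats_nodup (chunks : List (List Char))
    (d d' : PySem.Dict (List Char) (List Char))
    (h : pvBuildFeats chunks d = some d') (hd : d.keys.Nodup) : d'.keys.Nodup := by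
  induction chunks generalizing d with
  | nil => simp only [pvBuildFeats] at h; cases h; exact hd
  | cons c rest ih =>
      simp only [pvBuildFeats] at h
      split at h
      · exact ih _ h (PySem.Dict.nodup_keys_insert _ _ _ hd)
      · cases h

theorem pvMakePosAndTag_nodup (tag sep : String) (p : List Char)
    (d : PySem.Dict (List Char) (List Char))
    (h : pvMakePosAndTag tag sep = some (p, d)) : d.keys.Nodup := by
  simp only [pvMakePosAndTag] at h
  split at h <;> split at h
  all_goals try (cases h; exact PySem.Dict.nodup_keys_empty)
  all_goals split at h
  all_goals try (cases h)
  all_goals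
    obtain ⟨d0, hb, heq⟩ := Option.map_eq_some_iff.mp h
  all_goals cases heq
  all_goals exact pvBuildFeats_nodup _ _ _ hb PySem.Dict.nodup_keys_empty

-- sortedness of the merge inputs: the sorted key list of a Nodup key list is strictly <
theorem pvSortKeys_perm (ks : List (List Char)) : (pvSortKeys ks).Perm ks := by
  have := @PySem.List.sorted_perm (List Char) (List Char)
    List.instLinearOrder.toLT LinearOrder.toDecidableLT ks (fun k => k) false
  exact this

theorem pvSortKeys_pairwise_lt (ks : List (List Char)) (h : ks.Nodup) :
    (pvSortKeys ks).Pairwise (· < ·) := by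
  have hle : (pvSortKeys ks).Pairwise (· ≤ ·) :=
    @PySem.List.sorted_pairwise (List Char) (List Char) _ ks (fun k => k)
  have hnd : (pvSortKeys ks).Nodup := (pvSortKeys_perm ks).nodup_iff.mpr h
  exact (hle.and hnd).imp (fun hp => lt_of_le_of_ne hp.1 hp.2)

-- casting the idle count to the 0/1 sum B's tail sums denote
theorem pv_count_eq_sum (l : List (List Char)) :
    ((l.countP (fun k => decide (k ∉ pvIdle)) : Nat) : Int)
      = (l.map (fun k => if k ∈ pvIdle then (0 : Int) else 1)).sum := by
  induction l with
  | nil => simp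
  | cons x t ih =>
      simp only [List.countP_cons, List.map_cons, List.sum_cons]
      by_cases hx : x ∈ pvIdle <;> simp only [hx, decide_true, decide_false,
          not_true_eq_false, not_false_eq_true, if_true, if_false] <;> push_cast <;>
        rw [ih] <;> ring

-- the merge over two strictly-sorted key lists is A's two per-key sums
theorem pv_merge_eq (ff sf : PySem.Dict (List Char) (List Char))
    (l1 l2 : List (List Char)) :
    l1.Pairwise (· < ·) → l2.Pairwise (· < ·) →
    pvMergeCount ff sf l1 l2 =
      (l1.map (fun k => if k ∈ l2 then (if ff.getD k [] ≠ sf.getD k [] then (1 : Int) else 0)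
                        else (if k ∈ pvIdle then 0 else 1))).sum
      + (l2.map (fun k => if k ∉ l1 ∧ k ∉ pvIdle then (1 : Int) else 0)).sum := by
  fun_induction pvMergeCount ff sf l1 l2 with
  | case1 t1 k t2 ih =>
      intro h1 h2
      obtain ⟨h1h, h1t⟩ := List.pairwise_cons.mp h1
      obtain ⟨h2h, h2t⟩ := List.pairwise_cons.mp h2
      rw [ih h1t h2t]
      have e1 : ∀ x ∈ t1,
          (if x ∈ k :: t2 then (if ff.getD x [] ≠ sf.getD x [] then (1 : Int) else 0)
           else (if x ∈ pvIdle then 0 else 1))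
          = (if x ∈ t2 then (if ff.getD x [] ≠ sf.getD x [] then (1 : Int) else 0)
             else (if x ∈ pvIdle then 0 else 1)) := by
        intro x hx
        have : x ≠ k := fun he => absurd (he ▸ h1h x hx) (lt_irrefl k)
        simp [List.mem_cons, this]
      have e2 : ∀ x ∈ t2,
          (if x ∉ k :: t1 ∧ x ∉ pvIdle then (1 : Int) else 0)
          = (if x ∉ t1 ∧ x ∉ pvIdle then (1 : Int) else 0) := by
        intro x hx
        have : x ≠ k := fun he => absurd (he ▸ h2h x hx) (lt_irrefl k)
        simp [List.mem_cons, this]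
      simp only [List.map_cons, List.sum_cons, List.map_congr_left e1, List.map_congr_left e2]
      have hm : k ∈ k :: t2 := List.mem_cons_self
      have hn : ¬ (k ∉ k :: t1 ∧ k ∉ pvIdle) := fun h => h.1 List.mem_cons_self
      rw [if_pos hm, if_neg hn]
      ring
  | case2 k1 t1 k2 t2 hne hlt ih =>
      intro h1 h2
      obtain ⟨h1h, h1t⟩ := List.pairwise_cons.mp h1
      obtain ⟨h2h, _⟩ := List.pairwise_cons.mp h2
      rw [ih h1t h2]
      have hk1 : k1 ∉ k2 :: t2 := by
        intro hm
        rcases List.mem_cons.mp hm with he | hm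
        · exact hne he
        · exact absurd (lt_trans hlt (h2h k1 hm)) (lt_irrefl k1)
      have e2 : ∀ x ∈ k2 :: t2,
          (if x ∉ k1 :: t1 ∧ x ∉ pvIdle then (1 : Int) else 0)
          = (if x ∉ t1 ∧ x ∉ pvIdle then (1 : Int) else 0) := by
        intro x hx
        have hk1x : k1 < x := by
          rcases List.mem_cons.mp hx with he | hm
          · exact he ▸ hlt
          · exact lt_trans hlt (h2h x hm)
        have : x ≠ k1 := fun he => absurd (he ▸ hk1x) (lt_irrefl k1)
        simp [List.mem_cons, this]
      rw [List.map_congr_left e2]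
      simp only [List.map_cons, List.sum_cons, if_neg hk1]
      ring
  | case3 k1 t1 k2 t2 hne hnlt ih =>
      intro h1 h2
      have hgt : k2 < k1 := lt_of_le_of_ne (not_lt.mp hnlt) (fun he => hne he.symm)
      obtain ⟨h1h, _⟩ := List.pairwise_cons.mp h1
      obtain ⟨h2h, h2t⟩ := List.pairwise_cons.mp h2
      rw [ih h1 h2t]
      have hk2 : k2 ∉ k1 :: t1 := by
        intro hm
        rcases List.mem_cons.mp hm with he | hm
        · exact hne he.symm
        · exact absurd (lt_trans hgt (h1h k2 hm)) (lt_irrefl k2)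
      have e1 : ∀ x ∈ k1 :: t1,
          (if x ∈ k2 :: t2 then (if ff.getD x [] ≠ sf.getD x [] then (1 : Int) else 0)
           else (if x ∈ pvIdle then 0 else 1))
          = (if x ∈ t2 then (if ff.getD x [] ≠ sf.getD x [] then (1 : Int) else 0)
             else (if x ∈ pvIdle then 0 else 1)) := by
        intro x hx
        have hk2x : k2 < x := by
          rcases List.mem_cons.mp hx with he | hm
          · exact he ▸ hgt
          · exact lt_trans hgt (h1h x hm)
        have : x ≠ k2 := fun he => absurd (he ▸ hk2x) (lt_irrefl k2)
        simp [List.mem_cons, this]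
      rw [List.map_congr_left e1]
      have hhead : (if k2 ∉ k1 :: t1 ∧ k2 ∉ pvIdle then (1 : Int) else 0)
          = (if k2 ∈ pvIdle then 0 else 1) := by
        by_cases hi : k2 ∈ pvIdle <;> simp [hi, hk2]
      simp only [List.map_cons, List.sum_cons, hhead]
      ring
  | case4 ks2 =>
      intro _ _
      rw [pv_count_eq_sum]
      simp only [List.map_nil, List.sum_nil, List.not_mem_nil, not_false_eq_true, true_and,
        zero_add]
      congr 1
      apply List.map_congr_left
      intro x _
      by_cases hi : x ∈ pvIdle <;> simp [hi]
  | case5 ks1 ks2 hcons hnil =>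
      intro _ _
      have hks2 : ks2 = [] := by
        cases h1 : ks1 with
        | nil => exact absurd h1 (by intro h; exact hnil h)
        | cons a t =>
          cases h2 : ks2 with
          | nil => rfl
          | cons b u => exact absurd (hcons a t b u h1 h2) not_false
      subst hks2
      rw [pv_count_eq_sum]
      simp

-- B's merge of the two sorted key lists, in terms of the unsorted key lists
theorem pvB_eq_sums (ff sf : PySem.Dict (List Char) (List Char))
    (hf : ff.keys.Nodup) (hs : sf.keys.Nodup) :
    pvMergeCount ff sf (pvSortKeys ff.keys) (pvSortKeys sf.keys)
      = (ff.keys.map (pvF ff sf)).sum + (sf.keys.map (pvG ff)).sum := by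
  have p1 := pvSortKeys_perm ff.keys
  have p2 := pvSortKeys_perm sf.keys
  rw [pv_merge_eq ff sf _ _ (pvSortKeys_pairwise_lt _ hf) (pvSortKeys_pairwise_lt _ hs)]
  have e1 : ∀ x ∈ pvSortKeys ff.keys,
      (if x ∈ pvSortKeys sf.keys then (if ff.getD x [] ≠ sf.getD x [] then (1 : Int) else 0)
       else (if x ∈ pvIdle then 0 else 1)) = pvF ff sf x := by
    intro x _
    unfold pvF
    rw [if_congr (iff_of_eq (propext (p2.mem_iff))) rfl rfl]
  have e2 : ∀ x ∈ pvSortKeys sf.keys,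
      (if x ∉ pvSortKeys ff.keys ∧ x ∉ pvIdle then (1 : Int) else 0) = pvG ff x := by
    intro x _
    unfold pvG
    rw [if_congr (by rw [p1.mem_iff]) rfl rfl]
  rw [List.map_congr_left e1, List.map_congr_left e2,
    (p1.map (pvF ff sf)).sum_eq, (p2.map (pvG ff)).sum_eq]

-- A's first loop body, per key, is pvF
theorem pvA_loop1 (ff sf : PySem.Dict (List Char) (List Char)) (hf : ff.keys.Nodup) :
    (ff.items.map (fun kv =>
        match sf.get? kv.1 with
        | none => if kv.1 ∈ pvIdle then (0 : Int) else 1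
        | some other => if kv.2 ≠ other then 1 else 0)).sum
      = (ff.keys.map (pvF ff sf)).sum := by
  rw [PySem.Dict.items_eq_map_keys ff hf [], List.map_map]
  congr 1
  apply List.map_congr_left
  intro k _
  unfold pvF
  by_cases hmem : k ∈ sf.keys
  · have hne : sf.get? k ≠ none := fun hn =>
      absurd hmem ((PySem.Dict.get?_eq_none_iff_not_mem_keys sf k).mp hn)
    obtain ⟨o, ho⟩ := Option.ne_none_iff_exists'.mp hne
    have hgd : sf.getD k [] = o := by rw [PySem.Dict.getD_eq_get?_getD, ho]; rfl
    simp [ho, hgd, hmem]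
  · have ho : sf.get? k = none :=
      (PySem.Dict.get?_eq_none_iff_not_mem_keys sf k).mpr hmem
    simp [ho, hmem]

-- A's second loop body, per key, is pvG
theorem pvA_loop2 (ff sf : PySem.Dict (List Char) (List Char)) :
    (sf.keys.map (fun k =>
        if ¬ ff.contains k ∧ k ∉ pvIdle then (1 : Int) else 0)).sum
      = (sf.keys.map (pvG ff)).sum := by
  congr 1
  apply List.map_congr_left
  intro k _
  unfold pvG
  have : (¬ ff.contains k ∧ k ∉ pvIdle) ↔ (k ∉ ff.keys ∧ k ∉ pvIdle) := by
    constructor <;> intro ⟨h1, h2⟩ <;> refine ⟨?_, h2⟩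
    · intro hm; exact h1 ((PySem.Dict.contains_iff_mem_keys ff k).mpr hm)
    · simp only [Bool.not_eq_true]; by_contra hc
      exact h1 ((PySem.Dict.contains_iff_mem_keys ff k).mp (by simpa using hc))
  exact if_congr this rfl rfl

-- ===== VERDICT (by name: the statement is the Claim_ definition above) =====
theorem get_tag_distance_spec : Claim_equal_get_tag_distance := by
  unfold Claim_equal_get_tag_distance
  intro first second first_sep second_sep _ _
  unfold Spec_get_tag_distance
  unfold get_tag_distance get_tag_distance_alt
  cases h1 : pvMakePosAndTag first first_sep with
  | none => rfl
  | some v1 =>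
    cases h2 : pvMakePosAndTag second second_sep with
    | none => rfl
    | some v2 =>
      obtain ⟨fpos, ffeats⟩ := v1
      obtain ⟨spos, sfeats⟩ := v2
      have hf := pvMakePosAndTag_nodup _ _ _ _ h1
      have hs := pvMakePosAndTag_nodup _ _ _ _ h2
      simp only []
      rw [PySem.List.foldl_add, PySem.List.foldl_add]
      rw [pvA_loop1 ffeats sfeats hf, pvA_loop2 ffeats sfeats]
      rw [pvB_eq_sums ffeats sfeats hf hs]
      ring
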